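-- pv_equiv track=rewrite | github.com/tompko/praxis | python/bifid.py | make_polybius
-- ===== SOURCE A (Python) =====
-- def make_polybius(keyword):
--     keyword = [x.upper() for x in keyword if x.isalpha() and x.upper() != "I"]
--     keyword += list("ABCDEFGHJKLMNOPQRSTUVWXYZ")
--
--     square = [[] for i in range(5)]
--     coord_map = {}
--
--     col, row = 0,0
--     for k in keyword:
--         if k in coord_map:
--             continue
--         coord_map[k] = (row, col)
--         square[row].append(k)
--         col += 1
--         if col == 5:
--             col = 0
--             row += 1
--
--     coord_map["I"] = coord_map["J"]
--
--     return square, coord_map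
-- ===== SOURCE B (Python) =====
-- ALPHABET = "ABCDEFGHJKLMNOPQRSTUVWXYZ"
--
--
-- def make_polybius(keyword):
--     # order-preserving dedup of the keyword letters only, via dict.fromkeys
--     kw = dict.fromkeys(x.upper() for x in keyword if x.isalpha() and x.upper() != "I")
--     # partition: deduped keyword letters first, then the alphabet letters not used by the keyword
--     ordered = list(kw) + [c for c in ALPHABET if c not in kw]
--     square = [ordered[r * 5:(r + 1) * 5] for r in range(5)]
--     coord_map = {letter: (i // 5, i % 5) for i, letter in enumerate(ordered)}
--     coord_map["I"] = coord_map["J"]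
--     return square, coord_map
-- ===== Notes on version B (the rewrite author's own statement) =====
-- stated objective: simpler
-- what changed: A dedups the concatenated keyword+alphabet stream in one stateful loop (row/col counters, per-row append, membership test against the dict being built); B instead partitions: it dedups only the keyword letters with dict.fromkeys, appends the unused alphabet letters by a membership filter, then reshapes the flat list by slicing into rows of five and builds the coordinate map with enumerate and //,%.
import Mathlib
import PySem

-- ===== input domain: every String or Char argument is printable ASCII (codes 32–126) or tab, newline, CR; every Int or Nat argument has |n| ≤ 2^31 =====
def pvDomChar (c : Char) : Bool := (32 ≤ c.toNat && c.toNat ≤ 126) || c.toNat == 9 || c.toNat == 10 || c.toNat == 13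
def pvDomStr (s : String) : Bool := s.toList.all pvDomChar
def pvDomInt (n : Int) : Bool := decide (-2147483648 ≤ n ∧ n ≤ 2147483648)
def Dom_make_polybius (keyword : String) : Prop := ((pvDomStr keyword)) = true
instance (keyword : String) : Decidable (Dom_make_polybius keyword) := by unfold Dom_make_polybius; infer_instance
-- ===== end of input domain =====

-- B replaces A's single stateful dedup loop over keyword+alphabet (row/col counters, per-row
-- append, membership test against the dict being built) by a partition: dedup only the keyword
-- (dict.fromkeys), append the unused alphabet letters by filtering, then reshape by slicing.

-- ===== PORT A =====
-- [x.upper() for x in keyword if x.isalpha() and x.upper() != "I"]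
def pvKwLetters (keyword : String) : List String :=
  (keyword.toList.filter (fun x => PySem.Chars.isalpha x && PySem.Chars.upperChar x != 'I')).map
    (fun x => String.ofList [PySem.Chars.upperChar x])

-- list("ABCDEFGHJKLMNOPQRSTUVWXYZ")
def pvAlphabet : List String := "ABCDEFGHJKLMNOPQRSTUVWXYZ".toList.map (fun c => String.ofList [c])

-- square[row].append(k): row is a nonnegative counter, kept as Nat
def pvAppendAt (sq : List (List String)) (i : Nat) (x : String) : List (List String) :=
  match sq, i with
  | [], _ => []
  | r :: rest, 0 => (r ++ [x]) :: rest
  | r :: rest, n+1 => r :: pvAppendAt rest n x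

-- the body of A's for-loop, state (square, coord_map, col, row)
def pvStepA (st : List (List String) × PySem.Dict String (Int × Int) × Nat × Nat) (k : String) :
    List (List String) × PySem.Dict String (Int × Int) × Nat × Nat :=
  match st with
  | (square, cm, col, row) =>
    if cm.contains k then (square, cm, col, row)
    else
      let cm := cm.insert k ((row : Int), (col : Int))
      let square := pvAppendAt square row k
      let col := col + 1
      if col == 5 then (square, cm, 0, row + 1) else (square, cm, col, row)

def make_polybius (keyword : String) : List (List String) × (List (String × Int × Int)) :=
  let kw := pvKwLetters keyword ++ pvAlphabet
  let init : List (List String) × PySem.Dict String (Int × Int) × Nat × Nat :=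
    ((PySem.List.pyRange 0 5 1).map (fun _ => ([] : List String)), PySem.Dict.empty, 0, 0)
  match kw.foldl pvStepA init with
  | (square, cm, _, _) =>
    -- coord_map["I"] = coord_map["J"]; "J" is always a key (it comes from the appended alphabet)
    let cm := cm.insert "I" (cm.getD "J" (0, 0))
    (square, cm.items)

-- ===== PORT B =====
-- coord_map entry from one (index, letter) pair of enumerate(ordered)
def pvCoordStep (d : PySem.Dict String (Int × Int)) (p : Int × String) :
    PySem.Dict String (Int × Int) :=
  d.insert p.2 (PySem.Int.floordiv p.1 5, PySem.Int.mod p.1 5)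

def make_polybius_alt (keyword : String) : List (List String) × (List (String × Int × Int)) :=
  -- dict.fromkeys(...) used as an ordered dedup of the keyword letters = PySem.List.dedup
  let kw := PySem.List.dedup (pvKwLetters keyword)
  -- list(kw) + [c for c in ALPHABET if c not in kw]
  let ordered := kw ++ pvAlphabet.filter (fun c => !(kw.contains c))
  -- square = [ordered[r*5:(r+1)*5] for r in range(5)]
  let square := (PySem.List.pyRange 0 5 1).map
    (fun r => PySem.List.slice ordered (some (r * 5)) (some ((r + 1) * 5)))
  -- coord_map = {letter: (i // 5, i % 5) for i, letter in enumerate(ordered)}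
  let cm := (PySem.List.enumerate ordered 0).foldl pvCoordStep PySem.Dict.empty
  let cm := cm.insert "I" (cm.getD "J" (0, 0))
  (square, cm.items)

-- ===== PRECONDITION & SPEC =====
def Spec_make_polybius (keyword : String) (out : List (List String) × (List (String × Int × Int))) : Prop := out = make_polybius_alt keyword
instance (keyword : String) (out : List (List String) × (List (String × Int × Int))) : Decidable (Spec_make_polybius keyword out) := by unfold Spec_make_polybius; infer_instance

-- ===== CLAIM (what is proved, stated in full; the proofs are below) =====
def Claim_equal_make_polybius : Prop := ∀ (keyword : String), Dom_make_polybius keyword → Spec_make_polybius keyword (make_polybius keyword)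

-- ===== LEMMAS AND PROOFS =====

-- canonical value of both computations on a deduplicated list s
def pvSqOf (s : List String) : List (List String) :=
  [(s.drop 0).take 5, (s.drop 5).take 5, (s.drop 10).take 5, (s.drop 15).take 5, (s.drop 20).take 5]

def pvCoords (s : List String) : List (String × Int × Int) :=
  s.zipIdx.map (fun p => (p.1, ((p.2 / 5 : Nat) : Int), ((p.2 % 5 : Nat) : Int)))

def pvDictOf (s : List String) : PySem.Dict String (Int × Int) := ⟨pvCoords s⟩

def pvState (s : List String) : List (List String) × PySem.Dict String (Int × Int) × Nat × Nat :=
  (pvSqOf s, pvDictOf s, s.length % 5, s.length / 5)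

-- B's ordered list equals the order-preserving dedup of keyword letters ++ alphabet
lemma ordered_eq (u : List String) :
    PySem.Set.ofList (u ++ pvAlphabet) =
      PySem.List.dedup u ++
        pvAlphabet.filter (fun c => !((PySem.List.dedup u).contains c)) := by
  rw [PySem.Set.ofList_append,
      PySem.Set.update_eq_append_filter,
      PySem.Set.ofList_eq_self_of_nodup pvAlphabet (by decide)]
  simp [PySem.List.dedup_eq_ofList]

lemma pvCoords_append (s : List String) (k : String) :
    pvCoords (s ++ [k]) = pvCoords s ++ [(k, ((s.length / 5 : Nat) : Int), ((s.length % 5 : Nat) : Int))] := by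
  simp [pvCoords, List.zipIdx_append]

lemma any_fst_zipIdx (s : List String) (k : String) :
    ∀ n, ((s.zipIdx n).any fun x => x.1 == k) = s.contains k := by
  induction s with
  | nil => intro n; rfl
  | cons a t ih =>
    intro n
    simp only [List.zipIdx_cons, List.any_cons, ih, List.contains_cons]
    by_cases h : k = a
    · simp [h]
    · have h1 : (a == k) = false := by simpa using fun e : a = k => h e.symm
      have h2 : (k == a) = false := by simpa using h
      rw [h1, h2]

lemma contains_pvDictOf (s : List String) (k : String) :
    (pvDictOf s).contains k = s.contains k := by
  simp only [PySem.Dict.contains, pvDictOf, pvCoords, List.any_map, Function.comp_def]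
  exact any_fst_zipIdx s k 0

lemma chunk_lt (s : List String) (k : String) (m : Nat) (h : m + 5 ≤ s.length) :
    ((s ++ [k]).drop m).take 5 = (s.drop m).take 5 := by
  rw [List.drop_append_of_le_length (by omega), List.take_append_of_le_length (by simp; omega)]

lemma chunk_gt (s : List String) (k : String) (m : Nat) (h : s.length < m) :
    ((s ++ [k]).drop m).take 5 = (s.drop m).take 5 := by
  rw [List.drop_eq_nil_of_le (by simp; omega), List.drop_eq_nil_of_le (by omega)]

lemma chunk_eq (s : List String) (k : String) (m : Nat) (h1 : m ≤ s.length) (h2 : s.length < m + 5) :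
    ((s ++ [k]).drop m).take 5 = (s.drop m).take 5 ++ [k] := by
  rw [List.drop_append_of_le_length (by omega),
      List.take_of_length_le (by simp; omega), List.take_of_length_le (by simp; omega)]

lemma pvAppendAt_ge (sq : List (List String)) (i : Nat) (x : String) (h : sq.length ≤ i) :
    pvAppendAt sq i x = sq := by
  induction sq generalizing i with
  | nil => cases i <;> rfl
  | cons a t ih => cases i with
    | zero => simp at h
    | succ n => simp only [pvAppendAt]; rw [ih n (by simpa using h)]

lemma pvAppendAt_sqOf (s : List String) (k : String) :
    pvAppendAt (pvSqOf s) (s.length / 5) k = pvSqOf (s ++ [k]) := by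
  by_cases h25 : 25 ≤ s.length
  · rw [pvAppendAt_ge _ _ _ (by simp [pvSqOf]; omega)]
    simp only [pvSqOf, List.cons.injEq, and_true]
    exact ⟨(chunk_lt s k 0 (by omega)).symm, (chunk_lt s k 5 (by omega)).symm,
      (chunk_lt s k 10 (by omega)).symm, (chunk_lt s k 15 (by omega)).symm,
      (chunk_lt s k 20 (by omega)).symm⟩
  · push Not at h25
    have hr : s.length / 5 = 0 ∨ s.length / 5 = 1 ∨ s.length / 5 = 2 ∨ s.length / 5 = 3 ∨
        s.length / 5 = 4 := by omega
    rcases hr with h | h | h | h | h <;> rw [h] <;>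
      simp only [pvSqOf, pvAppendAt, List.cons.injEq, and_true] <;>
      refine ⟨?_, ?_, ?_, ?_, ?_⟩ <;>
      first
        | exact (chunk_eq s k 0 (by omega) (by omega)).symm
        | exact (chunk_eq s k 5 (by omega) (by omega)).symm
        | exact (chunk_eq s k 10 (by omega) (by omega)).symm
        | exact (chunk_eq s k 15 (by omega) (by omega)).symm
        | exact (chunk_eq s k 20 (by omega) (by omega)).symm
        | exact (chunk_lt s k 0 (by omega)).symm
        | exact (chunk_lt s k 5 (by omega)).symm
        | exact (chunk_lt s k 10 (by omega)).symm
        | exact (chunk_lt s k 15 (by omega)).symm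
        | exact (chunk_gt s k 5 (by omega)).symm
        | exact (chunk_gt s k 10 (by omega)).symm
        | exact (chunk_gt s k 15 (by omega)).symm
        | exact (chunk_gt s k 20 (by omega)).symm

lemma step_eq (s : List String) (k : String) :
    pvStepA (pvState s) k = pvState (PySem.Set.add s k) := by
  simp only [pvStepA, pvState, contains_pvDictOf, PySem.Set.add, PySem.Set.contains]
  by_cases hk : k ∈ s
  · simp [hk]
  · have hc : s.contains k = false := by simpa using hk
    have hins : (pvDictOf s).insert k (((s.length / 5 : Nat) : Int), ((s.length % 5 : Nat) : Int)) =
        pvDictOf (s ++ [k]) := by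
      simp only [PySem.Dict.insert, contains_pvDictOf, hc, Bool.false_eq_true, if_false]
      simp only [pvDictOf, pvCoords_append]
    by_cases h5 : s.length % 5 = 4
    · have hb : (s.length % 5 + 1 == 5) = true := by simp [h5]
      simp only [pvAppendAt_sqOf, hc, hb, hins, Bool.false_eq_true, if_false, if_true,
        Prod.mk.injEq]
      refine ⟨by trivial, by trivial, ?_, ?_⟩ <;> (simp; omega)
    · have hb : (s.length % 5 + 1 == 5) = false := by simp; omega
      simp only [pvAppendAt_sqOf, hc, hb, hins, Bool.false_eq_true, if_false, Prod.mk.injEq]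
      refine ⟨by trivial, by trivial, ?_, ?_⟩ <;> (simp; omega)

lemma foldA_state (ls : List String) : ∀ s : List String,
    ls.foldl pvStepA (pvState s) = pvState (PySem.Set.update s ls) := by
  induction ls with
  | nil => intro s; rfl
  | cons k ls ih =>
    intro s
    show (ls.foldl pvStepA (pvStepA (pvState s) k)) = _
    rw [step_eq, ih (PySem.Set.add s k)]
    rfl

lemma dictB_gen (d : List String) : ∀ s : List String, (s ++ d).Nodup →
    (PySem.List.enumerate d (s.length : Int)).foldl pvCoordStep (pvDictOf s) = pvDictOf (s ++ d) := by
  induction d with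
  | nil => intro s _; simp [PySem.List.enumerate]
  | cons k d ih =>
    intro s hnd
    have hk : ¬ k ∈ s := by
      have := hnd
      rw [List.nodup_append] at this
      exact fun hm => this.2.2 k hm k (by simp) rfl
    rw [PySem.List.enumerate_cons]
    have hstep : pvCoordStep (pvDictOf s) ((s.length : Int), k) = pvDictOf (s ++ [k]) := by
      simp only [pvCoordStep, PySem.Dict.insert, contains_pvDictOf]
      have hc : s.contains k = false := by simpa using hk
      simp only [hc, Bool.false_eq_true, if_false]
      have hdv : PySem.Int.floordiv (s.length : Int) 5 = ((s.length / 5 : Nat) : Int) := by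
        exact_mod_cast PySem.Int.floordiv_natCast s.length 5
      have hmd : PySem.Int.mod (s.length : Int) 5 = ((s.length % 5 : Nat) : Int) := by
        exact_mod_cast PySem.Int.mod_natCast s.length 5
      simp only [pvDictOf, pvCoords_append, hdv, hmd]
    show (PySem.List.enumerate d ((s.length : Int) + 1)).foldl pvCoordStep
        (pvCoordStep (pvDictOf s) ((s.length : Int), k)) = _
    rw [hstep]
    have hlen : ((s.length : Int) + 1) = (((s ++ [k]).length : Nat) : Int) := by
      simp
    rw [hlen, ih (s ++ [k]) (by simpa using hnd)]
    simp

lemma slices_eq_sqOf (d : List String) :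
    (PySem.List.pyRange 0 5 1).map
      (fun r => PySem.List.slice d (some (r * 5)) (some ((r + 1) * 5))) = pvSqOf d := by
  have hrange : PySem.List.pyRange 0 5 1 = [0, 1, 2, 3, 4] := by decide
  rw [hrange]
  simp only [List.map]
  rw [PySem.List.slice_toNat d (by norm_num) (by norm_num),
      PySem.List.slice_toNat d (by norm_num) (by norm_num),
      PySem.List.slice_toNat d (by norm_num) (by norm_num),
      PySem.List.slice_toNat d (by norm_num) (by norm_num),
      PySem.List.slice_toNat d (by norm_num) (by norm_num)]
  norm_num [pvSqOf]
  simp only [show (5 : Int).toNat = 5 from rfl, show (10 : Int).toNat = 10 from rfl,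
    show (15 : Int).toNat = 15 from rfl, show (20 : Int).toNat = 20 from rfl,
    show (25 : Int).toNat = 25 from rfl]
  norm_num


-- ===== VERDICT (by name: the statement is the Claim_ definition above) =====
theorem make_polybius_spec : Claim_equal_make_polybius := by
  intro keyword _
  unfold Spec_make_polybius make_polybius make_polybius_alt
  have hord := (ordered_eq (pvKwLetters keyword)).symm
  have hinit : ((PySem.List.pyRange 0 5 1).map (fun _ => ([] : List String)),
      (PySem.Dict.empty : PySem.Dict String (Int × Int)), (0 : Nat), (0 : Nat)) =
      pvState [] := by decide
  have hnd : (PySem.Set.ofList (pvKwLetters keyword ++ pvAlphabet)).Nodup :=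
    PySem.Set.nodup_ofList _
  have hdict := dictB_gen (PySem.Set.ofList (pvKwLetters keyword ++ pvAlphabet)) []
    (by simp [hnd])
  have hdict2 : List.foldl pvCoordStep PySem.Dict.empty
      (PySem.List.enumerate (PySem.Set.ofList (pvKwLetters keyword ++ pvAlphabet)) 0) =
      pvDictOf (PySem.Set.ofList (pvKwLetters keyword ++ pvAlphabet)) := hdict
  simp only [hord, hinit, foldA_state, slices_eq_sqOf, hdict2]
  have hupd : PySem.Set.update [] (pvKwLetters keyword ++ pvAlphabet) =
      PySem.Set.ofList (pvKwLetters keyword ++ pvAlphabet) := rfl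
  simp only [hupd]
  rfl
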